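-- pv_equiv track=rewrite | github.com/btsky99/vibe-coding | scripts/orchestrator.py | get_agent_task_count
-- ===== SOURCE A (Python) =====
-- KNOWN_AGENTS  = ['claude', 'gemini']    # 알려진 에이전트 목록
--
-- def get_agent_task_count(tasks: list) -> dict:
--     """에이전트별 미완료 태스크 수 집계"""
--     count = {agent: 0 for agent in KNOWN_AGENTS}
--     count['all'] = 0
--     for t in tasks:
--         if t.get('status') == 'done':
--             continue
--         assignee = t.get('assigned_to', 'all')
--         if assignee in count:
--             count[assignee] += 1
--         else:
--             count['all'] += 1
--     return count
-- ===== SOURCE B (Python) =====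
-- KNOWN_AGENTS = ['claude', 'gemini']
--
-- def get_agent_task_count(tasks: list) -> dict:
--     """에이전트별 미완료 태스크 수 집계"""
--     incomplete = [t for t in tasks if t.get('status') != 'done']
--     count = {agent: sum(1 for t in incomplete if t.get('assigned_to', 'all') == agent)
--              for agent in KNOWN_AGENTS}
--     count['all'] = sum(1 for t in incomplete if t.get('assigned_to', 'all') not in KNOWN_AGENTS)
--     return count
-- ===== Notes on version B (the rewrite author's own statement) =====
-- stated objective: simpler
-- what changed: Replaces A's single pass that mutates a pre-initialised dict bucket-by-bucket with a filter of the incomplete tasks followed by one independent count per bucket (known agents by equality, 'all' as assignee not in KNOWN_AGENTS).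
import Mathlib
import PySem

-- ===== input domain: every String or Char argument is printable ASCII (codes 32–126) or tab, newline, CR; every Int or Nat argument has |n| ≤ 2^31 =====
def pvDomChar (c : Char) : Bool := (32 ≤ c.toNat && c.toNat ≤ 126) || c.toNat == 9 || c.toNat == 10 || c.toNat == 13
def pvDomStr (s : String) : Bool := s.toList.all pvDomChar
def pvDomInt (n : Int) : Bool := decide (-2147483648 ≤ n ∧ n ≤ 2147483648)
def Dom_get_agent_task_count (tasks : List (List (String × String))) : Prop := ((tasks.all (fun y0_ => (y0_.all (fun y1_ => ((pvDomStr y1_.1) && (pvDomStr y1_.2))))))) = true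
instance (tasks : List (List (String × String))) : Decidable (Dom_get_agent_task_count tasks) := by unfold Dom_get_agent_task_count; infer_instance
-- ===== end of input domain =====

-- B replaces A's single bucketing loop over a mutable dict by a filter of the incomplete
-- tasks followed by one count per bucket (objective: simpler decomposition, same cost).

-- ===== PORT A =====
-- A: one pass over tasks, incrementing a bucket of a pre-initialised dict per task.
def get_agent_task_count (tasks : List (List (String × String))) : List (String × Int) :=
  let count : PySem.Dict String Int :=
    ["claude", "gemini"].foldl (fun d agent => d.insert agent 0) PySem.Dict.empty
  let count := count.insert "all" 0
  let count := tasks.foldl (fun count t =>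
    if (PySem.Dict.mk t).get? "status" = some "done" then count
    else
      let assignee := ((PySem.Dict.mk t).get? "assigned_to").getD "all"
      if count.contains assignee then count.modify assignee 0 (· + 1)
      else count.modify "all" 0 (· + 1)) count
  count.items

-- ===== PORT B =====
-- B: filter the incomplete tasks once, then one independent count per bucket.
def pvIncomplete (tasks : List (List (String × String))) : List (List (String × String)) :=
  tasks.filter (fun t => !((PySem.Dict.mk t).get? "status" == some "done"))

def pvAssignee (t : List (String × String)) : String :=
  ((PySem.Dict.mk t).get? "assigned_to").getD "all"

def get_agent_task_count_alt (tasks : List (List (String × String))) : List (String × Int) :=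
  let incomplete := pvIncomplete tasks
  let count : List (String × Int) :=
    ["claude", "gemini"].map (fun agent =>
      (agent, (incomplete.countP (fun t => pvAssignee t == agent) : Int)))
  count ++ [("all", (incomplete.countP (fun t => !(["claude", "gemini"].contains (pvAssignee t))) : Int))]

-- ===== PRECONDITION & SPEC =====
def Spec_get_agent_task_count (tasks : List (List (String × String))) (out : List (String × Int)) : Prop := out = get_agent_task_count_alt tasks
instance (tasks : List (List (String × String))) (out : List (String × Int)) : Decidable (Spec_get_agent_task_count tasks out) := by unfold Spec_get_agent_task_count; infer_instance

-- ===== CLAIM (what is proved, stated in full; the proofs are below) =====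
def Claim_equal_get_agent_task_count : Prop := ∀ (tasks : List (List (String × String))), Dom_get_agent_task_count tasks → Spec_get_agent_task_count tasks (get_agent_task_count tasks)

-- ===== LEMMAS AND PROOFS =====

-- proof-only alias for the body of A's loop (definitionally equal to the lambda in the port)
def pvStepA (count : PySem.Dict String Int) (t : List (String × String)) : PySem.Dict String Int :=
  if (PySem.Dict.mk t).get? "status" = some "done" then count
  else
    let assignee := ((PySem.Dict.mk t).get? "assigned_to").getD "all"
    if count.contains assignee then count.modify assignee 0 (· + 1)
    else count.modify "all" 0 (· + 1)

-- A's loop on the three-key dict, characterised by three counts, generalising the state.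
theorem pv_loopA (tasks : List (List (String × String))) (x y z : Int) :
    tasks.foldl pvStepA (PySem.Dict.mk [("claude", x), ("gemini", y), ("all", z)])
    = PySem.Dict.mk
        [("claude", x + ((pvIncomplete tasks).countP (fun t => pvAssignee t == "claude") : Int)),
         ("gemini", y + ((pvIncomplete tasks).countP (fun t => pvAssignee t == "gemini") : Int)),
         ("all", z + ((pvIncomplete tasks).countP (fun t => !(["claude", "gemini"].contains (pvAssignee t))) : Int))] := by
  induction tasks generalizing x y z with
  | nil => simp [pvIncomplete]
  | cons t ts ih =>
    rw [List.foldl_cons]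
    have hA : pvAssignee t = ((PySem.Dict.mk t).get? "assigned_to").getD "all" := rfl
    by_cases hs : (PySem.Dict.mk t).get? "status" = some "done"
    · have hstep : pvStepA (PySem.Dict.mk [("claude", x), ("gemini", y), ("all", z)]) t
          = PySem.Dict.mk [("claude", x), ("gemini", y), ("all", z)] := by
        unfold pvStepA; rw [if_pos hs]
      have hinc : pvIncomplete (t :: ts) = pvIncomplete ts := by
        simp [pvIncomplete, hs]
      rw [hstep, ih, hinc]
    · have hinc : pvIncomplete (t :: ts) = t :: pvIncomplete ts := by
        simp [pvIncomplete, hs]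
      by_cases hc : pvAssignee t = "claude"
      · have hstep : pvStepA (PySem.Dict.mk [("claude", x), ("gemini", y), ("all", z)]) t
            = PySem.Dict.mk [("claude", x + 1), ("gemini", y), ("all", z)] := by
          unfold pvStepA; rw [if_neg hs, ← hA, hc]; rfl
        rw [hstep, ih, hinc]
        simp [hc, PySem.Dict.ext_iff]
        omega
      · by_cases hg : pvAssignee t = "gemini"
        · have hstep : pvStepA (PySem.Dict.mk [("claude", x), ("gemini", y), ("all", z)]) t
              = PySem.Dict.mk [("claude", x), ("gemini", y + 1), ("all", z)] := by
            unfold pvStepA; rw [if_neg hs, ← hA, hg]; rfl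
          rw [hstep, ih, hinc]
          simp [hg, PySem.Dict.ext_iff]
          omega
        · by_cases ha : pvAssignee t = "all"
          · have hstep : pvStepA (PySem.Dict.mk [("claude", x), ("gemini", y), ("all", z)]) t
                = PySem.Dict.mk [("claude", x), ("gemini", y), ("all", z + 1)] := by
              unfold pvStepA; rw [if_neg hs, ← hA, ha]; rfl
            rw [hstep, ih, hinc]
            simp [hc, hg, PySem.Dict.ext_iff]
            omega
          · have hcont : (PySem.Dict.mk [("claude", x), ("gemini", y), ("all", z)]).contains (pvAssignee t) = false := by
              simp [PySem.Dict.contains_mk]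
              exact ⟨fun h => hc h.symm, fun h => hg h.symm, fun h => ha h.symm⟩
            have hstep : pvStepA (PySem.Dict.mk [("claude", x), ("gemini", y), ("all", z)]) t
                = PySem.Dict.mk [("claude", x), ("gemini", y), ("all", z + 1)] := by
              unfold pvStepA; rw [if_neg hs, ← hA]
              show (if (PySem.Dict.mk [("claude", x), ("gemini", y), ("all", z)]).contains (pvAssignee t) = true then
                      (PySem.Dict.mk [("claude", x), ("gemini", y), ("all", z)]).modify (pvAssignee t) 0 (· + 1)
                    else (PySem.Dict.mk [("claude", x), ("gemini", y), ("all", z)]).modify "all" 0 (· + 1)) = _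
              rw [hcont]; rfl
            rw [hstep, ih, hinc]
            simp [hc, hg, PySem.Dict.ext_iff]
            omega

-- ===== VERDICT (by name: the statement is the Claim_ definition above) =====
theorem get_agent_task_count_spec : Claim_equal_get_agent_task_count := by
  intro tasks _
  show get_agent_task_count tasks = get_agent_task_count_alt tasks
  have h : get_agent_task_count tasks
      = (tasks.foldl pvStepA (PySem.Dict.mk [("claude", 0), ("gemini", 0), ("all", 0)])).items := rfl
  rw [h, pv_loopA]
  simp [get_agent_task_count_alt]
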